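-- pv_equiv track=rewrite | github.com/sh95fit/CodingTest | 백준/Silver/25192. 인사성 밝은 곰곰이/인사성 밝은 곰곰이.py | count_gomgom_usage
-- ===== SOURCE A (Python) =====
-- def count_gomgom_usage(records):
--     count = 0
--     users = set()
--
--     for record in records:
--         if record == "ENTER":
--             users.clear()
--         else:
--             if record not in users:
--                 count += 1
--                 users.add(record)
--
--     return count
-- ===== SOURCE B (Python) =====
-- def count_gomgom_usage(records):
--     # Phase 1: partition records into ENTER-delimited sessions.
--     sessions = []
--     current = []
--     for r in records:
--         if r == "ENTER":
--             sessions.append(current)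
--             current = []
--         else:
--             current.append(r)
--     sessions.append(current)
--     # Phase 2: sum the number of distinct greetings per session.
--     return sum(len(set(s)) for s in sessions)
-- ===== Notes on version B (the rewrite author's own statement) =====
-- stated objective: alternative
-- what changed: Replaces the single pass with one running set by a two-phase partition-then-reduce: split the records into ENTER-delimited sessions, then sum len(set(session)) over the sessions.
import Mathlib
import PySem

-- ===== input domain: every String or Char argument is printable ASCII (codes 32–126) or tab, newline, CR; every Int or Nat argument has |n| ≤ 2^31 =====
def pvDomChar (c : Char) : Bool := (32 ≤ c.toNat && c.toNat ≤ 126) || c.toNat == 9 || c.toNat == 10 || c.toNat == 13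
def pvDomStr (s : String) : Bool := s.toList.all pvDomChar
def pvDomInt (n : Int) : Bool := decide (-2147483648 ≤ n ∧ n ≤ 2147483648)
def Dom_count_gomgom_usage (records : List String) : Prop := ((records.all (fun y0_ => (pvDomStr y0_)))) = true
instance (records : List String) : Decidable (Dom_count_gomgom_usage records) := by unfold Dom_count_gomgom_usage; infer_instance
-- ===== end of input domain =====

-- B replaces A's single pass with a running set by an explicit partition into
-- ENTER-delimited sessions followed by summing the distinct count per session
-- (objective: alternative decomposition; same return value, same cost).

-- ===== PORT A =====
-- A's loop body (one record updates (count, users))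
def pvStepA (st : Int × PySem.Set String) (record : String) : Int × PySem.Set String :=
  if record = "ENTER" then (st.1, PySem.Set.empty)
  else if PySem.Set.contains st.2 record then st
  else (st.1 + 1, PySem.Set.add st.2 record)

def count_gomgom_usage (records : List String) : Int :=
  (records.foldl pvStepA ((0 : Int), PySem.Set.empty)).1

-- ===== PORT B =====
-- phase 1 of Source B: the grouping loop body (state = (sessions, current))
def pvStepB (st : List (List String) × List String) (r : String) : List (List String) × List String :=
  if r = "ENTER" then (st.1 ++ [st.2], ([] : List String))
  else (st.1, st.2 ++ [r])

-- phase 2 of Source B: sum(len(set(s)) for s in sessions)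
def pvSumDistinct (sessions : List (List String)) : Int :=
  sessions.foldl (fun acc s => acc + PySem.Set.len (PySem.Set.ofList s)) 0

def count_gomgom_usage_alt (records : List String) : Int :=
  let st := records.foldl pvStepB ([], [])
  pvSumDistinct (st.1 ++ [st.2])

-- ===== PRECONDITION & SPEC =====
def Spec_count_gomgom_usage (records : List String) (out : Int) : Prop := out = count_gomgom_usage_alt records
instance (records : List String) (out : Int) : Decidable (Spec_count_gomgom_usage records out) := by unfold Spec_count_gomgom_usage; infer_instance

-- ===== CLAIM (what is proved, stated in full; the proofs are below) =====
def Claim_equal_count_gomgom_usage : Prop := ∀ (records : List String), Dom_count_gomgom_usage records → Spec_count_gomgom_usage records (count_gomgom_usage records)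

-- ===== LEMMAS AND PROOFS =====

-- the number of NEW distinct greetings contributed by `rest` when the current
-- session's running set of users is `s`
def pvDelta : List String → PySem.Set String → Int
  | [], _ => 0
  | r :: rest, s =>
    if r = "ENTER" then pvDelta rest PySem.Set.empty
    else if PySem.Set.contains s r then pvDelta rest s
    else 1 + pvDelta rest (PySem.Set.add s r)

theorem pv_ofList_append_one (cur : List String) (r : String) :
    PySem.Set.ofList (cur ++ [r]) = PySem.Set.add (PySem.Set.ofList cur) r := by
  simp [PySem.Set.ofList_eq_foldl]

theorem pvA_delta (rest : List String) : ∀ (s : PySem.Set String) (c : Int),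
    (rest.foldl pvStepA (c, s)).1 = c + pvDelta rest s := by
  induction rest with
  | nil => intro s c; simp [pvDelta]
  | cons r rest ih =>
    intro s c
    rw [List.foldl_cons]
    by_cases hE : r = "ENTER"
    · rw [show pvStepA (c, s) r = (c, PySem.Set.empty) by simp [pvStepA, hE],
        ih, pvDelta, if_pos hE]
    · by_cases hm : PySem.Set.contains s r = true
      · rw [show pvStepA (c, s) r = (c, s) by simp [pvStepA, hE]; simpa using hm,
          ih, pvDelta, if_neg hE, if_pos hm]
      · rw [show pvStepA (c, s) r = (c + 1, PySem.Set.add s r) by simp [pvStepA, hE]; simpa using hm,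
          ih, pvDelta, if_neg hE, if_neg hm]
        ring

theorem pv_len_add_one (s : PySem.Set String) (r : String) :
    PySem.Set.len (PySem.Set.add s r)
      = PySem.Set.len s + (if PySem.Set.contains s r then 0 else 1) := by
  rw [PySem.Set.add]
  by_cases hm : PySem.Set.contains s r = true
  · rw [if_pos hm, if_pos hm]; ring
  · rw [if_neg hm, if_neg hm]
    simp [PySem.Set.len]

theorem pvSumDistinct_shift (l : List (List String)) : ∀ (a : Int),
    l.foldl (fun acc s => acc + PySem.Set.len (PySem.Set.ofList s)) a
      = a + pvSumDistinct l := by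
  induction l with
  | nil => intro a; simp [pvSumDistinct]
  | cons s l ih =>
    intro a
    simp only [List.foldl, pvSumDistinct] at *
    rw [ih, ih (0 + _)]
    ring

theorem pvSumDistinct_append (l₁ l₂ : List (List String)) :
    pvSumDistinct (l₁ ++ l₂) = pvSumDistinct l₁ + pvSumDistinct l₂ := by
  unfold pvSumDistinct
  rw [List.foldl_append, pvSumDistinct_shift]
  rfl

theorem pvB_delta (rest : List String) : ∀ (sessions : List (List String)) (cur : List String),
    pvSumDistinct ((rest.foldl pvStepB (sessions, cur)).1 ++ [(rest.foldl pvStepB (sessions, cur)).2])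
      = pvSumDistinct sessions + PySem.Set.len (PySem.Set.ofList cur) + pvDelta rest (PySem.Set.ofList cur) := by
  induction rest with
  | nil =>
    intro sessions cur
    rw [pvDelta]
    simp only [List.foldl, pvSumDistinct_append]
    have : pvSumDistinct [cur] = PySem.Set.len (PySem.Set.ofList cur) := by
      simp [pvSumDistinct]
    rw [this]; ring
  | cons r rest ih =>
    intro sessions cur
    rw [List.foldl_cons]
    by_cases hE : r = "ENTER"
    · have h0 : pvStepB (sessions, cur) r = (sessions ++ [cur], ([] : List String)) := by
        simp [pvStepB, hE]
      rw [h0, ih, pvDelta, if_pos hE, pvSumDistinct_append]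
      have h1 : pvSumDistinct [cur] = PySem.Set.len (PySem.Set.ofList cur) := by
        simp [pvSumDistinct]
      have h2 : PySem.Set.len (PySem.Set.ofList ([] : List String)) = 0 := rfl
      have h3 : PySem.Set.ofList ([] : List String) = PySem.Set.empty := rfl
      rw [h1, h2, h3]; ring
    · have h0 : pvStepB (sessions, cur) r = (sessions, cur ++ [r]) := by
        simp [pvStepB, hE]
      rw [h0, ih, pv_ofList_append_one, pv_len_add_one, pvDelta, if_neg hE]
      by_cases hm : PySem.Set.contains (PySem.Set.ofList cur) r = true
      · rw [if_pos hm, if_pos hm,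
          show PySem.Set.add (PySem.Set.ofList cur) r = PySem.Set.ofList cur by
            rw [PySem.Set.add, if_pos hm]]
        ring
      · rw [if_neg hm, if_neg hm]; ring

-- ===== VERDICT (by name: the statement is the Claim_ definition above) =====
theorem count_gomgom_usage_spec : Claim_equal_count_gomgom_usage := by
  intro records _
  show count_gomgom_usage records = count_gomgom_usage_alt records
  show (List.foldl pvStepA ((0 : Int), PySem.Set.empty) records).1
      = pvSumDistinct ((List.foldl pvStepB ([], []) records).1
          ++ [(List.foldl pvStepB ([], []) records).2])
  have hB := pvB_delta records [] []
  rw [show PySem.Set.ofList ([] : List String) = PySem.Set.empty from rfl] at hB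
  rw [pvA_delta records PySem.Set.empty 0, hB,
    show pvSumDistinct [] = 0 from rfl,
    show PySem.Set.len PySem.Set.empty = 0 from rfl]
  ring
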